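-- pv_equiv track=rewrite | github.com/ravipandey1729/Price_Tracker | scrapers/ebay_scraper.py | _parse_availability
-- ===== SOURCE A (Python) =====
-- def _parse_availability(availability_text: str) -> bool:
--     """
--     Determine if product is available from availability text.
--
--     Args:
--         availability_text: Text from availability section
--
--     Returns:
--         True if available, False otherwise
--     """
--     availability_lower = availability_text.lower()
--
--     # Check for unavailable indicators
--     unavailable_phrases = [
--         'no longer available',
--         'out of stock',
--         'sold out',
--         'ended',
--     ]
--
--     for phrase in unavailable_phrases:
--         if phrase in availability_lower:
--             return False
--
--     # Check for available indicators
--     available_phrases = [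
--         'available',
--         'in stock',
--         'ready to ship',
--         'ships within',
--         'last one',
--         'limited quantity',
--         'more than',
--     ]
--
--     for phrase in available_phrases:
--         if phrase in availability_lower:
--             return True
--
--     # Default to True if unclear (eBay defaults to available)
--     return True
-- ===== SOURCE B (Python) =====
-- def _parse_availability(availability_text: str) -> bool:
--     # Position-driven single scan: walk the lowered text once and, at each
--     # index, test whether one of the unavailable phrases starts there.
--     # (A's available-phrase loop is dead: its True equals the default True.)
--     text = availability_text.lower()
--     phrases = ('no longer available', 'out of stock', 'sold out', 'ended')
--     for i in range(len(text)):
--         if any(text.startswith(p, i) for p in phrases):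
--             return False
--     return True
-- ===== Notes on version B (the rewrite author's own statement) =====
-- stated objective: alternative
-- what changed: Replaced A's phrase-driven substring searches (one 'in' scan per phrase, plus a dead second loop over available phrases) by a single position-driven scan of the lowered text that tests at each index whether any unavailable phrase starts there.
import Mathlib
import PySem

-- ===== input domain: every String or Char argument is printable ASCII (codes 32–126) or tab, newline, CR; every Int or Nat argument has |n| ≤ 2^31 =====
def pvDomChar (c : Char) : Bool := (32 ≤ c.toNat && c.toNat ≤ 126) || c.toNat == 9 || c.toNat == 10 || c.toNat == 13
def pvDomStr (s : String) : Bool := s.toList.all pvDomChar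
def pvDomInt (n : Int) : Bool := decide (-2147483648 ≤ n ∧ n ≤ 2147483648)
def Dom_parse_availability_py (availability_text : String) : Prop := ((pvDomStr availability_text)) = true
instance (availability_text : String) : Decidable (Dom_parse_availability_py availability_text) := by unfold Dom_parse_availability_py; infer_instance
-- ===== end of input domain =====

-- B replaces A's phrase-driven 'in' searches (and dead available-phrase loop) by one position-driven scan of the lowered text.
-- ===== PORT A =====
-- 'for phrase in unavailable_phrases: if phrase in availability_lower: return False', then the available loop
def pvLoopUnavail (phrases : List (List Char)) (t : List Char) (k : List Char → Bool) : Bool :=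
  match phrases with
  | [] => k t
  | p :: rest => if PySem.Chars.isIn p t then false else pvLoopUnavail rest t k

-- 'for phrase in available_phrases: if phrase in availability_lower: return True' then 'return True'
def pvLoopAvail (phrases : List (List Char)) (t : List Char) : Bool :=
  match phrases with
  | [] => true
  | p :: rest => if PySem.Chars.isIn p t then true else pvLoopAvail rest t

def parse_availability_py (availability_text : String) : Bool :=
  let availability_lower := PySem.Chars.lower availability_text.toList
  pvLoopUnavail
    ["no longer available".toList, "out of stock".toList, "sold out".toList, "ended".toList]
    availability_lower
    (pvLoopAvail
      ["available".toList, "in stock".toList, "ready to ship".toList, "ships within".toList,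
       "last one".toList, "limited quantity".toList, "more than".toList])

-- ===== PORT B =====
def pvPhrasesB : List (List Char) :=
  ["no longer available".toList, "out of stock".toList, "sold out".toList, "ended".toList]

-- Source B's index loop 'for i in range(len(text))' with 'text.startswith(p, i)' ported as
-- structural recursion over the suffixes of text (exact: startswith(p, i) = p.isPrefixOf (text.drop i))
def pvScanB (t : List Char) : Bool :=
  match t with
  | [] => true
  | c :: rest => if pvPhrasesB.any (fun p => p.isPrefixOf (c :: rest)) then false else pvScanB rest

def parse_availability_py_alt (availability_text : String) : Bool :=
  pvScanB (PySem.Chars.lower availability_text.toList)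

-- ===== PRECONDITION & SPEC =====
def Spec_parse_availability_py (availability_text : String) (out : Bool) : Prop := out = parse_availability_py_alt availability_text
instance (availability_text : String) (out : Bool) : Decidable (Spec_parse_availability_py availability_text out) := by unfold Spec_parse_availability_py; infer_instance

-- ===== CLAIM (what is proved, stated in full; the proofs are below) =====
def Claim_equal_parse_availability_py : Prop := ∀ (availability_text : String), Dom_parse_availability_py availability_text → Spec_parse_availability_py availability_text (parse_availability_py availability_text)

-- ===== LEMMAS AND PROOFS =====
-- the available-phrase loop always returns true
theorem pvLoopAvail_true (phrases : List (List Char)) (t : List Char) : pvLoopAvail phrases t = true := by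
  induction phrases with
  | nil => rfl
  | cons p rest ih => simp [pvLoopAvail, ih]

-- B's suffix scan returns true iff no (nonempty) phrase is an infix of the text
theorem pvScanB_eq_true_iff (t : List Char) :
    pvScanB t = true ↔ ∀ p ∈ pvPhrasesB, ¬ p <:+: t := by
  induction t with
  | nil =>
    simp only [pvScanB, true_iff]
    intro p hp h
    have : p = [] := List.eq_nil_of_infix_nil h
    subst this
    revert hp; decide
  | cons c rest ih =>
    simp only [pvScanB]
    by_cases h : pvPhrasesB.any (fun p => p.isPrefixOf (c :: rest)) = true
    · simp only [h, if_true]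
      constructor
      · intro hf; exact absurd hf (by simp)
      · intro hall
        obtain ⟨p, hp, hpre⟩ := List.any_eq_true.mp h
        exact absurd ((List.isPrefixOf_iff_prefix.mp hpre).isInfix) (hall p hp)
    · rw [if_neg h, ih]
      constructor
      · intro hall p hp hinf
        rcases List.infix_cons_iff.mp hinf with hpre | hinf'
        · exact h (List.any_eq_true.mpr ⟨p, hp, List.isPrefixOf_iff_prefix.mpr hpre⟩)
        · exact hall p hp hinf'
      · intro hall p hp hinf
        exact hall p hp (hinf.trans (List.suffix_cons c rest).isInfix)

-- A returns true iff no unavailable phrase is an infix of the lowered text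
theorem pvLoopUnavail_eq_true_iff (phrases : List (List Char)) (t : List Char) (k : List Char → Bool)
    (hk : k t = true) :
    pvLoopUnavail phrases t k = true ↔ ∀ p ∈ phrases, ¬ p <:+: t := by
  induction phrases with
  | nil => simp [pvLoopUnavail, hk]
  | cons p rest ih =>
    simp only [pvLoopUnavail]
    by_cases h : PySem.Chars.isIn p t = true
    · simp only [h, if_true]
      constructor
      · intro hf; exact absurd hf (by simp)
      · intro hall; exact absurd ((PySem.Chars.isIn_iff_infix _ _).mp h) (hall p (by simp))
    · rw [if_neg h, ih]
      constructor
      · intro hall q hq hinf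
        rcases List.mem_cons.mp hq with rfl | hq'
        · exact h ((PySem.Chars.isIn_iff_infix _ _).mpr hinf)
        · exact hall q hq' hinf
      · intro hall q hq hinf; exact hall q (by simp [hq]) hinf

-- ===== VERDICT (by name: the statement is the Claim_ definition above) =====
theorem parse_availability_py_spec : Claim_equal_parse_availability_py := by
  intro s _
  unfold Spec_parse_availability_py parse_availability_py parse_availability_py_alt
  rw [Bool.eq_iff_iff]
  rw [pvLoopUnavail_eq_true_iff _ _ _ (pvLoopAvail_true _ _), pvScanB_eq_true_iff]
  rfl
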